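-- pv_equiv track=rewrite | github.com/a8594755-maker/Decision-Intelligence- | src/ml/api/replenishment_solver.py | _summarize_infeasibility
-- ===== SOURCE A (Python) =====
-- from typing import Any, Callable, Dict, List, Optional, Set, Tuple
--
-- def _suggestions_for_categories(categories: Set[str]) -> List[str]:
--     actions: List[str] = []
--     if "safety_stock" in categories:
--         actions.append("Lower safety stock targets or increase supply to maintain buffer levels.")
--     if "capacity" in categories:
--         actions.append("Increase shared production/inventory capacity in constrained periods.")
--         actions.append("Reduce demand target or allow backlog for constrained periods.")
--     if "budget" in categories:
--         actions.append("Increase shared budget cap or prioritize lower-cost SKUs.")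
--     if "moq_pack" in categories:
--         actions.append("Reduce MOQ/pack constraints or relax max_order_qty caps.")
--     if "lead_time" in categories:
--         actions.append("Reduce lead times or bring in open POs earlier.")
--     if "demand_infeasible" in categories:
--         actions.append("Lower service_level_target or increase supply capacity.")
--     if "bom_shortage" in categories:
--         actions.append("Increase component supply or adjust BOM usage assumptions.")
--     if not actions:
--         actions.append("Relax one hard constraint family at a time and retry.")
--     return actions[:6]
--
-- def _summarize_infeasibility(tags: List[str]) -> Dict[str, Any]:
--     categories: Set[str] = set()
--     for tag in tags:
--         if tag.startswith("CAP_PROD") or tag.startswith("CAP_INV") or tag.startswith("CAP_VOL") or tag.startswith("CAP_WEIGHT"):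
--             categories.add("capacity")
--         elif tag.startswith("BUDGET_GLOBAL") or tag.startswith("BUDGET_PERIOD"):
--             categories.add("budget")
--         elif tag.startswith("MOQ") or tag.startswith("PACK") or tag.startswith("MAXQ"):
--             categories.add("moq_pack")
--         elif tag.startswith("BALANCE_INV"):
--             categories.add("lead_time")
--         elif tag.startswith("SAFETY_STOCK"):
--             categories.add("safety_stock")
--         elif tag.startswith("SERVICE_LEVEL_GLOBAL"):
--             categories.add("demand_infeasible")
--         elif tag.startswith("BOM_LINK") or tag.startswith("COMP_FEAS"):
--             categories.add("bom_shortage")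
--
--     category_list = sorted(categories) if categories else ["capacity"]
--     suggestions = _suggestions_for_categories(set(category_list))
--     return {
--         "categories": category_list,
--         "top_offending_tags": sorted(set(tags))[:12],
--         "suggestions": suggestions,
--     }
-- ===== SOURCE B (Python) =====
-- from typing import Any, Dict, List
--
-- # Category-major rewrite: instead of pushing every tag through a first-match
-- # if/elif prefix chain into a set and sorting that set, walk the seven
-- # categories in alphabetical order and keep each category some tag matches;
-- # this is correct because no prefix of one category is a string-prefix of a
-- # prefix of another category, so the per-tag first-match order never matters,
-- # and the alphabetical walk makes the final sort of categories disappear.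
--
-- _CATEGORY_PREFIXES = [  # alphabetical by category name
--     ("bom_shortage", ("BOM_LINK", "COMP_FEAS")),
--     ("budget", ("BUDGET_GLOBAL", "BUDGET_PERIOD")),
--     ("capacity", ("CAP_PROD", "CAP_INV", "CAP_VOL", "CAP_WEIGHT")),
--     ("demand_infeasible", ("SERVICE_LEVEL_GLOBAL",)),
--     ("lead_time", ("BALANCE_INV",)),
--     ("moq_pack", ("MOQ", "PACK", "MAXQ")),
--     ("safety_stock", ("SAFETY_STOCK",)),
-- ]
--
-- _SUGGESTIONS = [  # in the priority order suggestions are reported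
--     ("safety_stock", ["Lower safety stock targets or increase supply to maintain buffer levels."]),
--     ("capacity", ["Increase shared production/inventory capacity in constrained periods.",
--                   "Reduce demand target or allow backlog for constrained periods."]),
--     ("budget", ["Increase shared budget cap or prioritize lower-cost SKUs."]),
--     ("moq_pack", ["Reduce MOQ/pack constraints or relax max_order_qty caps."]),
--     ("lead_time", ["Reduce lead times or bring in open POs earlier."]),
--     ("demand_infeasible", ["Lower service_level_target or increase supply capacity."]),
--     ("bom_shortage", ["Increase component supply or adjust BOM usage assumptions."]),
-- ]
--
--
-- def _summarize_infeasibility(tags: List[str]) -> Dict[str, Any]: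
--     category_list = [cat for cat, prefixes in _CATEGORY_PREFIXES
--                      if any(t.startswith(prefixes) for t in tags)] or ["capacity"]
--     suggestions = [a for cat, acts in _SUGGESTIONS if cat in category_list for a in acts]
--     return {
--         "categories": category_list,
--         "top_offending_tags": list(dict.fromkeys(sorted(tags)))[:12],
--         "suggestions": suggestions[:6],
--     }
-- ===== Notes on version B (the rewrite author's own statement) =====
-- stated objective: alternative
-- what changed: B inverts the loop nesting: instead of A's tag-major pass that classifies each tag through a first-match if/elif prefix chain into a set and then sorts the set, B walks the seven categories in alphabetical order and keeps each category matched by any tag (sound because no category's prefix is a string-prefix of another category's prefix), so the set and the category sort vanish; suggestions become one comprehension over a priority-ordered table with no empty-fallback, and top tags are sort-then-adjacent-dedup (dict.fromkeys of sorted) instead of set-then-sort.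
import Mathlib
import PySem

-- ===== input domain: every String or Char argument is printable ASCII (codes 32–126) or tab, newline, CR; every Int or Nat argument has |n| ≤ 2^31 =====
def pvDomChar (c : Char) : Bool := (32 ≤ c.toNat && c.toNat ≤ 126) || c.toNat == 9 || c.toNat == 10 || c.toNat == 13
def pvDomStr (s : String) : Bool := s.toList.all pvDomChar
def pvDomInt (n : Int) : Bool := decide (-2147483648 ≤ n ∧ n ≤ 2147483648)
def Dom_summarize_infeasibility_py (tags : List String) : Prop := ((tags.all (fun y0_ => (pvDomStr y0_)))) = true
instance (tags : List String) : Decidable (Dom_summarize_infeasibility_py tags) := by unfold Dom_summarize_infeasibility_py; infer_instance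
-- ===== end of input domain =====

-- B inverts the loop nesting (category-major any-match over an alphabetical table instead of A's
-- tag-major first-match elif chain into a sorted set); alternative decomposition, same cost.


-- ===== PORT A =====
-- _suggestions_for_categories: the chain of membership ifs, appending to `actions`
def a_suggestions (categories : PySem.Set String) : List String :=
  let actions : List String := []
  let actions := if PySem.Set.contains categories "safety_stock" then actions ++ ["Lower safety stock targets or increase supply to maintain buffer levels."] else actions
  let actions := if PySem.Set.contains categories "capacity" then (actions ++ ["Increase shared production/inventory capacity in constrained periods."]) ++ ["Reduce demand target or allow backlog for constrained periods."] else actions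
  let actions := if PySem.Set.contains categories "budget" then actions ++ ["Increase shared budget cap or prioritize lower-cost SKUs."] else actions
  let actions := if PySem.Set.contains categories "moq_pack" then actions ++ ["Reduce MOQ/pack constraints or relax max_order_qty caps."] else actions
  let actions := if PySem.Set.contains categories "lead_time" then actions ++ ["Reduce lead times or bring in open POs earlier."] else actions
  let actions := if PySem.Set.contains categories "demand_infeasible" then actions ++ ["Lower service_level_target or increase supply capacity."] else actions
  let actions := if PySem.Set.contains categories "bom_shortage" then actions ++ ["Increase component supply or adjust BOM usage assumptions."] else actions
  let actions := if actions = [] then actions ++ ["Relax one hard constraint family at a time and retry."] else actions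
  PySem.List.slice actions none (some 6)

-- the for-loop with the if/elif prefix chain, as a foldl over the same set state
def a_step (cs : PySem.Set String) (tag : String) : PySem.Set String :=
  if PySem.Str.startswith tag "CAP_PROD" || PySem.Str.startswith tag "CAP_INV" || PySem.Str.startswith tag "CAP_VOL" || PySem.Str.startswith tag "CAP_WEIGHT" then
    PySem.Set.add cs "capacity"
  else if PySem.Str.startswith tag "BUDGET_GLOBAL" || PySem.Str.startswith tag "BUDGET_PERIOD" then
    PySem.Set.add cs "budget"
  else if PySem.Str.startswith tag "MOQ" || PySem.Str.startswith tag "PACK" || PySem.Str.startswith tag "MAXQ" then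
    PySem.Set.add cs "moq_pack"
  else if PySem.Str.startswith tag "BALANCE_INV" then
    PySem.Set.add cs "lead_time"
  else if PySem.Str.startswith tag "SAFETY_STOCK" then
    PySem.Set.add cs "safety_stock"
  else if PySem.Str.startswith tag "SERVICE_LEVEL_GLOBAL" then
    PySem.Set.add cs "demand_infeasible"
  else if PySem.Str.startswith tag "BOM_LINK" || PySem.Str.startswith tag "COMP_FEAS" then
    PySem.Set.add cs "bom_shortage"
  else cs

def summarize_infeasibility_py (tags : List String) : List (String × List String) :=
  let categories : PySem.Set String := tags.foldl a_step PySem.Set.empty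
  let category_list := if categories = [] then ["capacity"] else PySem.List.sorted categories (fun x => x) false
  let suggestions := a_suggestions (PySem.Set.ofList category_list)
  [("categories", category_list),
   ("top_offending_tags", PySem.List.slice (PySem.List.sorted (PySem.Set.ofList tags) (fun x => x) false) none (some 12)),
   ("suggestions", suggestions)]

-- ===== PORT B =====
-- _CATEGORY_PREFIXES: alphabetical by category name
def b_cats : List (String × List String) :=
  [("bom_shortage", ["BOM_LINK", "COMP_FEAS"]),
   ("budget", ["BUDGET_GLOBAL", "BUDGET_PERIOD"]),
   ("capacity", ["CAP_PROD", "CAP_INV", "CAP_VOL", "CAP_WEIGHT"]),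
   ("demand_infeasible", ["SERVICE_LEVEL_GLOBAL"]),
   ("lead_time", ["BALANCE_INV"]),
   ("moq_pack", ["MOQ", "PACK", "MAXQ"]),
   ("safety_stock", ["SAFETY_STOCK"])]

-- _SUGGESTIONS: priority order of reported actions
def b_sugg : List (String × List String) :=
  [("safety_stock", ["Lower safety stock targets or increase supply to maintain buffer levels."]),
   ("capacity", ["Increase shared production/inventory capacity in constrained periods.",
                 "Reduce demand target or allow backlog for constrained periods."]),
   ("budget", ["Increase shared budget cap or prioritize lower-cost SKUs."]),
   ("moq_pack", ["Reduce MOQ/pack constraints or relax max_order_qty caps."]),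
   ("lead_time", ["Reduce lead times or bring in open POs earlier."]),
   ("demand_infeasible", ["Lower service_level_target or increase supply capacity."]),
   ("bom_shortage", ["Increase component supply or adjust BOM usage assumptions."])]

def summarize_infeasibility_py_alt (tags : List String) : List (String × List String) :=
  let cl := (b_cats.filter (fun cp => tags.any (fun t => cp.2.any (fun p => PySem.Str.startswith t p)))).map (fun cp => cp.1)
  let category_list := if cl = [] then ["capacity"] else cl
  let suggestions := (b_sugg.filter (fun ca => category_list.contains ca.1)).flatMap (fun ca => ca.2)
  [("categories", category_list),
   ("top_offending_tags", PySem.List.slice (PySem.List.dedup (PySem.List.sorted tags (fun x => x) false)) none (some 12)),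
   ("suggestions", PySem.List.slice suggestions none (some 6))]

-- ===== PRECONDITION & SPEC =====
def Spec_summarize_infeasibility_py (tags : List String) (out : List (String × List String)) : Prop := out = summarize_infeasibility_py_alt tags
instance (tags : List String) (out : List (String × List String)) : Decidable (Spec_summarize_infeasibility_py tags out) := by unfold Spec_summarize_infeasibility_py; infer_instance

-- ===== CLAIM (what is proved, stated in full; the proofs are below) =====
def Claim_equal_summarize_infeasibility_py : Prop := ∀ (tags : List String), Dom_summarize_infeasibility_py tags → Spec_summarize_infeasibility_py tags (summarize_infeasibility_py tags)

-- ===== LEMMAS AND PROOFS =====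

-- A's per-tag elif chain as a classifier (proof helper, mirrors a_step's branch order)
def aClassify (tag : String) : Option String :=
  if ["CAP_PROD", "CAP_INV", "CAP_VOL", "CAP_WEIGHT"].any (fun p => PySem.Str.startswith tag p) then some "capacity"
  else if ["BUDGET_GLOBAL", "BUDGET_PERIOD"].any (fun p => PySem.Str.startswith tag p) then some "budget"
  else if ["MOQ", "PACK", "MAXQ"].any (fun p => PySem.Str.startswith tag p) then some "moq_pack"
  else if ["BALANCE_INV"].any (fun p => PySem.Str.startswith tag p) then some "lead_time"
  else if ["SAFETY_STOCK"].any (fun p => PySem.Str.startswith tag p) then some "safety_stock"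
  else if ["SERVICE_LEVEL_GLOBAL"].any (fun p => PySem.Str.startswith tag p) then some "demand_infeasible"
  else if ["BOM_LINK", "COMP_FEAS"].any (fun p => PySem.Str.startswith tag p) then some "bom_shortage"
  else none

lemma a_step_eq_classify (cs : PySem.Set String) (tag : String) :
    a_step cs tag = match aClassify tag with
      | some c => PySem.Set.add cs c
      | none => cs := by
  unfold a_step aClassify
  simp only [List.any_cons, List.any_nil, Bool.or_false, Bool.or_assoc]
  split_ifs <;> rfl

lemma fold_eq (tags : List String) : ∀ cs : PySem.Set String,
    tags.foldl a_step cs = List.foldl PySem.Set.add cs ((tags.map aClassify).filterMap id) := by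
  induction tags with
  | nil => intro cs; rfl
  | cons t ts ih =>
    intro cs
    simp only [List.foldl_cons, List.map_cons, List.filterMap_cons]
    rw [a_step_eq_classify]
    cases aClassify t <;> simp [ih]

-- two startswith's on one string force a prefix relation between the two prefixes
lemma sw_excl (t p q : String)
    (h : ¬ (p.toList <+: q.toList) ∧ ¬ (q.toList <+: p.toList))
    (hp : PySem.Str.startswith t p = true) : PySem.Str.startswith t q = false := by
  rw [PySem.Str.startswith_eq, PySem.Chars.startswith_iff] at hp
  rw [PySem.Str.startswith_eq, ← Bool.not_eq_true, PySem.Chars.startswith_iff]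
  intro hq
  rcases List.prefix_or_prefix_of_prefix hp hq with h1 | h1
  · exact h.1 h1
  · exact h.2 h1

-- prefixes of distinct categories are prefix-incomparable (finite check over the table)
lemma table_disjoint : ∀ e1 ∈ b_cats, ∀ e2 ∈ b_cats, e1.1 ≠ e2.1 →
    ∀ p ∈ e1.2, ∀ q ∈ e2.2, ¬ (p.toList <+: q.toList) ∧ ¬ (q.toList <+: p.toList) := by decide

-- a tag matching one category's prefixes matches no other category's
lemma excl {t c1 c2 : String} {ps1 ps2 : List String}
    (h1 : (c1, ps1) ∈ b_cats) (h2 : (c2, ps2) ∈ b_cats) (hne : c1 ≠ c2)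
    (hm : ps1.any (fun p => PySem.Str.startswith t p) = true) :
    ps2.any (fun p => PySem.Str.startswith t p) = false := by
  rw [List.any_eq_true] at hm
  obtain ⟨p, hp, hsw⟩ := hm
  rw [← Bool.not_eq_true, List.any_eq_true]
  rintro ⟨q, hq, hswq⟩
  have hf := sw_excl t p q (table_disjoint (c1, ps1) h1 (c2, ps2) h2 hne p hp q hq) hsw
  rw [hf] at hswq
  exact Bool.false_ne_true hswq

lemma aClassify_range {t c : String} (h : aClassify t = some c) :
    ∃ ps, (c, ps) ∈ b_cats := by
  unfold aClassify at h
  split_ifs at h <;> simp_all [b_cats] <;> (subst h; simp)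

-- A's first-match classification agrees with B's any-match test, category by category
lemma classify_iff (t : String) (c : String) (ps : List String) (h : (c, ps) ∈ b_cats) :
    aClassify t = some c ↔ ps.any (fun p => PySem.Str.startswith t p) = true := by
  fin_cases h
  · constructor
    · intro hcl; unfold aClassify at hcl; split_ifs at hcl <;> simp_all
    · intro hm
      have e0 : (["BUDGET_GLOBAL", "BUDGET_PERIOD"].any (fun p => PySem.Str.startswith t p)) = false := excl (c1 := "bom_shortage") (h1 := by decide) (by decide : ("budget", ["BUDGET_GLOBAL", "BUDGET_PERIOD"]) ∈ b_cats) (by decide) hm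
      have e1 : (["CAP_PROD", "CAP_INV", "CAP_VOL", "CAP_WEIGHT"].any (fun p => PySem.Str.startswith t p)) = false := excl (c1 := "bom_shortage") (h1 := by decide) (by decide : ("capacity", ["CAP_PROD", "CAP_INV", "CAP_VOL", "CAP_WEIGHT"]) ∈ b_cats) (by decide) hm
      have e2 : (["SERVICE_LEVEL_GLOBAL"].any (fun p => PySem.Str.startswith t p)) = false := excl (c1 := "bom_shortage") (h1 := by decide) (by decide : ("demand_infeasible", ["SERVICE_LEVEL_GLOBAL"]) ∈ b_cats) (by decide) hm
      have e3 : (["BALANCE_INV"].any (fun p => PySem.Str.startswith t p)) = false := excl (c1 := "bom_shortage") (h1 := by decide) (by decide : ("lead_time", ["BALANCE_INV"]) ∈ b_cats) (by decide) hm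
      have e4 : (["MOQ", "PACK", "MAXQ"].any (fun p => PySem.Str.startswith t p)) = false := excl (c1 := "bom_shortage") (h1 := by decide) (by decide : ("moq_pack", ["MOQ", "PACK", "MAXQ"]) ∈ b_cats) (by decide) hm
      have e5 : (["SAFETY_STOCK"].any (fun p => PySem.Str.startswith t p)) = false := excl (c1 := "bom_shortage") (h1 := by decide) (by decide : ("safety_stock", ["SAFETY_STOCK"]) ∈ b_cats) (by decide) hm
      unfold aClassify; simp_all
  · constructor
    · intro hcl; unfold aClassify at hcl; split_ifs at hcl <;> simp_all
    · intro hm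
      have e0 : (["BOM_LINK", "COMP_FEAS"].any (fun p => PySem.Str.startswith t p)) = false := excl (c1 := "budget") (h1 := by decide) (by decide : ("bom_shortage", ["BOM_LINK", "COMP_FEAS"]) ∈ b_cats) (by decide) hm
      have e1 : (["CAP_PROD", "CAP_INV", "CAP_VOL", "CAP_WEIGHT"].any (fun p => PySem.Str.startswith t p)) = false := excl (c1 := "budget") (h1 := by decide) (by decide : ("capacity", ["CAP_PROD", "CAP_INV", "CAP_VOL", "CAP_WEIGHT"]) ∈ b_cats) (by decide) hm
      have e2 : (["SERVICE_LEVEL_GLOBAL"].any (fun p => PySem.Str.startswith t p)) = false := excl (c1 := "budget") (h1 := by decide) (by decide : ("demand_infeasible", ["SERVICE_LEVEL_GLOBAL"]) ∈ b_cats) (by decide) hm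
      have e3 : (["BALANCE_INV"].any (fun p => PySem.Str.startswith t p)) = false := excl (c1 := "budget") (h1 := by decide) (by decide : ("lead_time", ["BALANCE_INV"]) ∈ b_cats) (by decide) hm
      have e4 : (["MOQ", "PACK", "MAXQ"].any (fun p => PySem.Str.startswith t p)) = false := excl (c1 := "budget") (h1 := by decide) (by decide : ("moq_pack", ["MOQ", "PACK", "MAXQ"]) ∈ b_cats) (by decide) hm
      have e5 : (["SAFETY_STOCK"].any (fun p => PySem.Str.startswith t p)) = false := excl (c1 := "budget") (h1 := by decide) (by decide : ("safety_stock", ["SAFETY_STOCK"]) ∈ b_cats) (by decide) hm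
      unfold aClassify; simp_all
  · constructor
    · intro hcl; unfold aClassify at hcl; split_ifs at hcl <;> simp_all
    · intro hm
      have e0 : (["BOM_LINK", "COMP_FEAS"].any (fun p => PySem.Str.startswith t p)) = false := excl (c1 := "capacity") (h1 := by decide) (by decide : ("bom_shortage", ["BOM_LINK", "COMP_FEAS"]) ∈ b_cats) (by decide) hm
      have e1 : (["BUDGET_GLOBAL", "BUDGET_PERIOD"].any (fun p => PySem.Str.startswith t p)) = false := excl (c1 := "capacity") (h1 := by decide) (by decide : ("budget", ["BUDGET_GLOBAL", "BUDGET_PERIOD"]) ∈ b_cats) (by decide) hm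
      have e2 : (["SERVICE_LEVEL_GLOBAL"].any (fun p => PySem.Str.startswith t p)) = false := excl (c1 := "capacity") (h1 := by decide) (by decide : ("demand_infeasible", ["SERVICE_LEVEL_GLOBAL"]) ∈ b_cats) (by decide) hm
      have e3 : (["BALANCE_INV"].any (fun p => PySem.Str.startswith t p)) = false := excl (c1 := "capacity") (h1 := by decide) (by decide : ("lead_time", ["BALANCE_INV"]) ∈ b_cats) (by decide) hm
      have e4 : (["MOQ", "PACK", "MAXQ"].any (fun p => PySem.Str.startswith t p)) = false := excl (c1 := "capacity") (h1 := by decide) (by decide : ("moq_pack", ["MOQ", "PACK", "MAXQ"]) ∈ b_cats) (by decide) hm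
      have e5 : (["SAFETY_STOCK"].any (fun p => PySem.Str.startswith t p)) = false := excl (c1 := "capacity") (h1 := by decide) (by decide : ("safety_stock", ["SAFETY_STOCK"]) ∈ b_cats) (by decide) hm
      unfold aClassify; simp_all
  · constructor
    · intro hcl; unfold aClassify at hcl; split_ifs at hcl <;> simp_all
    · intro hm
      have e0 : (["BOM_LINK", "COMP_FEAS"].any (fun p => PySem.Str.startswith t p)) = false := excl (c1 := "demand_infeasible") (h1 := by decide) (by decide : ("bom_shortage", ["BOM_LINK", "COMP_FEAS"]) ∈ b_cats) (by decide) hm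
      have e1 : (["BUDGET_GLOBAL", "BUDGET_PERIOD"].any (fun p => PySem.Str.startswith t p)) = false := excl (c1 := "demand_infeasible") (h1 := by decide) (by decide : ("budget", ["BUDGET_GLOBAL", "BUDGET_PERIOD"]) ∈ b_cats) (by decide) hm
      have e2 : (["CAP_PROD", "CAP_INV", "CAP_VOL", "CAP_WEIGHT"].any (fun p => PySem.Str.startswith t p)) = false := excl (c1 := "demand_infeasible") (h1 := by decide) (by decide : ("capacity", ["CAP_PROD", "CAP_INV", "CAP_VOL", "CAP_WEIGHT"]) ∈ b_cats) (by decide) hm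
      have e3 : (["BALANCE_INV"].any (fun p => PySem.Str.startswith t p)) = false := excl (c1 := "demand_infeasible") (h1 := by decide) (by decide : ("lead_time", ["BALANCE_INV"]) ∈ b_cats) (by decide) hm
      have e4 : (["MOQ", "PACK", "MAXQ"].any (fun p => PySem.Str.startswith t p)) = false := excl (c1 := "demand_infeasible") (h1 := by decide) (by decide : ("moq_pack", ["MOQ", "PACK", "MAXQ"]) ∈ b_cats) (by decide) hm
      have e5 : (["SAFETY_STOCK"].any (fun p => PySem.Str.startswith t p)) = false := excl (c1 := "demand_infeasible") (h1 := by decide) (by decide : ("safety_stock", ["SAFETY_STOCK"]) ∈ b_cats) (by decide) hm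
      unfold aClassify; simp_all
  · constructor
    · intro hcl; unfold aClassify at hcl; split_ifs at hcl <;> simp_all
    · intro hm
      have e0 : (["BOM_LINK", "COMP_FEAS"].any (fun p => PySem.Str.startswith t p)) = false := excl (c1 := "lead_time") (h1 := by decide) (by decide : ("bom_shortage", ["BOM_LINK", "COMP_FEAS"]) ∈ b_cats) (by decide) hm
      have e1 : (["BUDGET_GLOBAL", "BUDGET_PERIOD"].any (fun p => PySem.Str.startswith t p)) = false := excl (c1 := "lead_time") (h1 := by decide) (by decide : ("budget", ["BUDGET_GLOBAL", "BUDGET_PERIOD"]) ∈ b_cats) (by decide) hm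
      have e2 : (["CAP_PROD", "CAP_INV", "CAP_VOL", "CAP_WEIGHT"].any (fun p => PySem.Str.startswith t p)) = false := excl (c1 := "lead_time") (h1 := by decide) (by decide : ("capacity", ["CAP_PROD", "CAP_INV", "CAP_VOL", "CAP_WEIGHT"]) ∈ b_cats) (by decide) hm
      have e3 : (["SERVICE_LEVEL_GLOBAL"].any (fun p => PySem.Str.startswith t p)) = false := excl (c1 := "lead_time") (h1 := by decide) (by decide : ("demand_infeasible", ["SERVICE_LEVEL_GLOBAL"]) ∈ b_cats) (by decide) hm
      have e4 : (["MOQ", "PACK", "MAXQ"].any (fun p => PySem.Str.startswith t p)) = false := excl (c1 := "lead_time") (h1 := by decide) (by decide : ("moq_pack", ["MOQ", "PACK", "MAXQ"]) ∈ b_cats) (by decide) hm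
      have e5 : (["SAFETY_STOCK"].any (fun p => PySem.Str.startswith t p)) = false := excl (c1 := "lead_time") (h1 := by decide) (by decide : ("safety_stock", ["SAFETY_STOCK"]) ∈ b_cats) (by decide) hm
      unfold aClassify; simp_all
  · constructor
    · intro hcl; unfold aClassify at hcl; split_ifs at hcl <;> simp_all
    · intro hm
      have e0 : (["BOM_LINK", "COMP_FEAS"].any (fun p => PySem.Str.startswith t p)) = false := excl (c1 := "moq_pack") (h1 := by decide) (by decide : ("bom_shortage", ["BOM_LINK", "COMP_FEAS"]) ∈ b_cats) (by decide) hm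
      have e1 : (["BUDGET_GLOBAL", "BUDGET_PERIOD"].any (fun p => PySem.Str.startswith t p)) = false := excl (c1 := "moq_pack") (h1 := by decide) (by decide : ("budget", ["BUDGET_GLOBAL", "BUDGET_PERIOD"]) ∈ b_cats) (by decide) hm
      have e2 : (["CAP_PROD", "CAP_INV", "CAP_VOL", "CAP_WEIGHT"].any (fun p => PySem.Str.startswith t p)) = false := excl (c1 := "moq_pack") (h1 := by decide) (by decide : ("capacity", ["CAP_PROD", "CAP_INV", "CAP_VOL", "CAP_WEIGHT"]) ∈ b_cats) (by decide) hm
      have e3 : (["SERVICE_LEVEL_GLOBAL"].any (fun p => PySem.Str.startswith t p)) = false := excl (c1 := "moq_pack") (h1 := by decide) (by decide : ("demand_infeasible", ["SERVICE_LEVEL_GLOBAL"]) ∈ b_cats) (by decide) hm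
      have e4 : (["BALANCE_INV"].any (fun p => PySem.Str.startswith t p)) = false := excl (c1 := "moq_pack") (h1 := by decide) (by decide : ("lead_time", ["BALANCE_INV"]) ∈ b_cats) (by decide) hm
      have e5 : (["SAFETY_STOCK"].any (fun p => PySem.Str.startswith t p)) = false := excl (c1 := "moq_pack") (h1 := by decide) (by decide : ("safety_stock", ["SAFETY_STOCK"]) ∈ b_cats) (by decide) hm
      unfold aClassify; simp_all
  · constructor
    · intro hcl; unfold aClassify at hcl; split_ifs at hcl <;> simp_all
    · intro hm
      have e0 : (["BOM_LINK", "COMP_FEAS"].any (fun p => PySem.Str.startswith t p)) = false := excl (c1 := "safety_stock") (h1 := by decide) (by decide : ("bom_shortage", ["BOM_LINK", "COMP_FEAS"]) ∈ b_cats) (by decide) hm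
      have e1 : (["BUDGET_GLOBAL", "BUDGET_PERIOD"].any (fun p => PySem.Str.startswith t p)) = false := excl (c1 := "safety_stock") (h1 := by decide) (by decide : ("budget", ["BUDGET_GLOBAL", "BUDGET_PERIOD"]) ∈ b_cats) (by decide) hm
      have e2 : (["CAP_PROD", "CAP_INV", "CAP_VOL", "CAP_WEIGHT"].any (fun p => PySem.Str.startswith t p)) = false := excl (c1 := "safety_stock") (h1 := by decide) (by decide : ("capacity", ["CAP_PROD", "CAP_INV", "CAP_VOL", "CAP_WEIGHT"]) ∈ b_cats) (by decide) hm
      have e3 : (["SERVICE_LEVEL_GLOBAL"].any (fun p => PySem.Str.startswith t p)) = false := excl (c1 := "safety_stock") (h1 := by decide) (by decide : ("demand_infeasible", ["SERVICE_LEVEL_GLOBAL"]) ∈ b_cats) (by decide) hm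
      have e4 : (["BALANCE_INV"].any (fun p => PySem.Str.startswith t p)) = false := excl (c1 := "safety_stock") (h1 := by decide) (by decide : ("lead_time", ["BALANCE_INV"]) ∈ b_cats) (by decide) hm
      have e5 : (["MOQ", "PACK", "MAXQ"].any (fun p => PySem.Str.startswith t p)) = false := excl (c1 := "safety_stock") (h1 := by decide) (by decide : ("moq_pack", ["MOQ", "PACK", "MAXQ"]) ∈ b_cats) (by decide) hm
      unfold aClassify; simp_all

-- A's sorted classification set IS B's alphabetical filtered table
lemma cats_eq (tags : List String) :
    PySem.List.sorted (tags.foldl a_step PySem.Set.empty) (fun x => x) false =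
      (b_cats.filter (fun cp => tags.any (fun t => cp.2.any (fun p => PySem.Str.startswith t p)))).map (fun cp => cp.1) := by
  have hpw : ((b_cats.filter (fun cp => tags.any (fun t => cp.2.any (fun p => PySem.Str.startswith t p)))).map (fun cp => cp.1)).Pairwise (fun a b => a < b) := by
    have hsub : ((b_cats.filter (fun cp => tags.any (fun t => cp.2.any (fun p => PySem.Str.startswith t p)))).map (fun cp => cp.1)).Sublist (b_cats.map (fun cp => cp.1)) :=
      List.Sublist.map (fun cp : String × List String => cp.1) (List.filter_sublist (l := b_cats))
    have hall : (b_cats.map (fun cp => cp.1)).Pairwise (fun a b : String => a < b) := by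
      simp [b_cats, List.pairwise_cons]; decide
    exact List.Pairwise.sublist hsub hall
  rw [show tags.foldl a_step PySem.Set.empty = PySem.Set.ofList ((tags.map aClassify).filterMap id) from by
        rw [PySem.Set.ofList_eq_foldl]; exact fold_eq tags PySem.Set.empty]
  apply PySem.List.sorted_eq_of_perm_of_pairwise_lt _ _ _ _ hpw
  rw [List.perm_ext_iff_of_nodup (List.Pairwise.imp ne_of_lt hpw) (PySem.Set.nodup_ofList _)]
  intro c
  simp only [List.mem_map, List.mem_filter, PySem.Set.mem_ofList, List.mem_filterMap, id_eq,
    List.any_eq_true]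
  constructor
  · rintro ⟨cp, ⟨hmem, t, ht, p, hp, hsw⟩, rfl⟩
    refine ⟨some cp.1, ⟨t, ht, (classify_iff t cp.1 cp.2 (by cases cp; exact hmem)).2 ?_⟩, rfl⟩
    rw [List.any_eq_true]
    exact ⟨p, hp, hsw⟩
  · rintro ⟨o, ⟨t, ht, hcl⟩, rfl⟩
    obtain ⟨ps, hps⟩ := aClassify_range hcl
    have hany := (classify_iff t c ps hps).1 hcl
    rw [List.any_eq_true] at hany
    obtain ⟨p, hp, hsw⟩ := hany
    exact ⟨(c, ps), ⟨hps, t, ht, p, hp, hsw⟩, rfl⟩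

-- the suggestion chain vs. the flattened priority table, for any nonempty list of known categories
lemma contains_ofList (l : List String) (n : String) :
    PySem.Set.contains (PySem.Set.ofList l) n = l.contains n := by
  rw [Bool.eq_iff_iff]
  show (PySem.Set.ofList l).contains n = true ↔ _
  simp [PySem.Set.mem_ofList]

lemma sugg_eq (l : List String) (hne : l ≠ [])
    (hsub : ∀ x ∈ l, x ∈ (b_cats.map (fun cp => cp.1))) :
    a_suggestions (PySem.Set.ofList l) =
      PySem.List.slice ((b_sugg.filter (fun ca => l.contains ca.1)).flatMap (fun ca => ca.2)) none (some 6) := by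
  have hor : (l.contains "bom_shortage" || l.contains "budget" || l.contains "capacity" ||
      l.contains "demand_infeasible" || l.contains "lead_time" || l.contains "moq_pack" ||
      l.contains "safety_stock") = true := by
    obtain ⟨x, hx⟩ := List.exists_mem_of_ne_nil l hne
    have := hsub x hx
    simp only [b_cats, List.map_cons, List.map_nil, List.mem_cons, List.not_mem_nil, or_false] at this
    rcases this with rfl | rfl | rfl | rfl | rfl | rfl | rfl <;>
      simp [hx]
  unfold a_suggestions b_sugg
  simp only [contains_ofList, List.filter_cons, List.filter_nil]
  generalize l.contains "safety_stock" = b1 at hor ⊢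
  generalize l.contains "capacity" = b2 at hor ⊢
  generalize l.contains "budget" = b3 at hor ⊢
  generalize l.contains "moq_pack" = b4 at hor ⊢
  generalize l.contains "lead_time" = b5 at hor ⊢
  generalize l.contains "demand_infeasible" = b6 at hor ⊢
  generalize l.contains "bom_shortage" = b7 at hor ⊢
  cases b1 <;> cases b2 <;> cases b3 <;> cases b4 <;> cases b5 <;> cases b6 <;> cases b7 <;>
    first | rfl | simp at hor

-- PySem.Set.ofList keeps a subsequence of its input
lemma foldl_add_sublist {α : Type} [BEq α] (l acc : List α) :
    (List.foldl PySem.Set.add acc l).Sublist (acc ++ l) := by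
  induction l generalizing acc with
  | nil => simp
  | cons x r ih =>
    simp only [List.foldl_cons]
    refine (ih (PySem.Set.add acc x)).trans ?_
    unfold PySem.Set.add
    split
    · exact (List.append_sublist_append_left acc).2 (List.sublist_cons_self x r)
    · simp [List.append_assoc]
lemma ofList_sublist {α : Type} [BEq α] (l : List α) : (PySem.Set.ofList l).Sublist l := by
  rw [PySem.Set.ofList_eq_foldl]
  simpa using foldl_add_sublist l []

-- sorted(set(xs)) = dict.fromkeys(sorted(xs))
lemma top_eq (tags : List String) :
    PySem.List.sorted (PySem.Set.ofList tags) (fun x => x) false =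
      PySem.List.dedup (PySem.List.sorted tags (fun x => x) false) := by
  rw [PySem.List.dedup_eq_ofList]
  apply PySem.List.sorted_eq_of_perm_of_pairwise_lt
  · rw [List.perm_ext_iff_of_nodup (PySem.Set.nodup_ofList _) (PySem.Set.nodup_ofList _)]
    intro a
    simp only [PySem.Set.mem_ofList, PySem.List.mem_sorted]
  · have hle : (PySem.Set.ofList (PySem.List.sorted tags (fun x => x) false)).Pairwise
        (fun a b : String => a ≤ b) :=
      List.Pairwise.sublist (ofList_sublist _) (PySem.List.sorted_pairwise tags (fun x => x))
    have hne : (PySem.Set.ofList (PySem.List.sorted tags (fun x => x) false)).Pairwise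
        (fun a b : String => a ≠ b) := PySem.Set.nodup_ofList _
    exact (hle.and hne).imp (fun h => lt_of_le_of_ne h.1 h.2)

-- ===== VERDICT (by name: the statement is the Claim_ definition above) =====
theorem summarize_infeasibility_py_spec : Claim_equal_summarize_infeasibility_py := by
  intro tags _
  unfold Spec_summarize_infeasibility_py summarize_infeasibility_py summarize_infeasibility_py_alt
  have hc := cats_eq tags
  have hnil : (tags.foldl a_step PySem.Set.empty = ([] : List String)) ↔
      ((b_cats.filter (fun cp => tags.any (fun t => cp.2.any (fun p => PySem.Str.startswith t p)))).map (fun cp => cp.1) = []) := by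
    rw [← hc, PySem.List.sorted_eq_nil_iff]
  by_cases h : tags.foldl a_step PySem.Set.empty = ([] : List String)
  · have hs := sugg_eq ["capacity"] (by simp) (by decide)
    simp only [h, hnil.1 h, top_eq tags, hs, reduceIte]
  · have h2 : ¬ ((b_cats.filter (fun cp => tags.any (fun t => cp.2.any (fun p => PySem.Str.startswith t p)))).map (fun cp => cp.1) = []) :=
      fun he => h (hnil.2 he)
    have hs := sugg_eq _ h2 (by
      intro x hx
      simp only [List.mem_map, List.mem_filter] at hx ⊢
      obtain ⟨cp, ⟨hm, _⟩, rfl⟩ := hx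
      exact ⟨cp, hm, rfl⟩)
    simp only [if_neg h, if_neg h2, hc, top_eq tags, hs]
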